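-- pv_equiv track=rewrite | github.com/shreyasingh2/stylelab-mvp | scripts/build_live_catalog.py | _balance_by_category
-- ===== SOURCE A (Python) =====
-- def _balance_by_category(
--     rows: list[dict],
--     max_per_category: int = 3,
--     max_total: int = 8,
-- ) -> list[dict]:
--     """Select a diverse subset from a flat list of tagged product rows.
--
--     Ensures no single garment category dominates by capping each category
--     at ``max_per_category`` items.  Products from under-represented
--     categories are preferred.  Returns up to ``max_total`` products.
--     """
--     from collections import defaultdict
--
--     buckets: dict[str, list[dict]] = defaultdict(list)
--     for row in rows:
--         cat = row.get("category", "") or "other"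
--         buckets[cat].append(row)
--
--     # Round-robin across categories for maximum diversity
--     selected: list[dict] = []
--     cat_counts: dict[str, int] = defaultdict(int)
--
--     # Priority order: dresses/tops/bottoms first, outerwear last
--     priority_order = ["dress", "top", "bottom", "skirt", "jumpsuit", "knitwear", "outerwear", "other"]
--     ordered_cats = [c for c in priority_order if c in buckets]
--     # Add any categories not in priority list
--     ordered_cats += [c for c in buckets if c not in ordered_cats]
--
--     round_idx = 0
--     while len(selected) < max_total:
--         added_any = False
--         for cat in ordered_cats:
--             if cat_counts[cat] >= max_per_category:
--                 continue
--             if round_idx < len(buckets[cat]):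
--                 selected.append(buckets[cat][round_idx])
--                 cat_counts[cat] += 1
--                 added_any = True
--                 if len(selected) >= max_total:
--                     break
--         round_idx += 1
--         if not added_any:
--             break
--
--     return selected
-- ===== SOURCE B (Python) =====
-- def _balance_by_category(
--     rows: list[dict],
--     max_per_category: int = 3,
--     max_total: int = 8,
-- ) -> list[dict]:
--     """Select a diverse subset: cap each category, round-robin by transposition."""
--     from collections import defaultdict
--
--     buckets: dict[str, list[dict]] = defaultdict(list)
--     for row in rows:
--         cat = row.get("category", "") or "other"
--         buckets[cat].append(row)
--
--     priority_order = ["dress", "top", "bottom", "skirt", "jumpsuit", "knitwear", "outerwear", "other"]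
--     ordered_cats = [c for c in priority_order if c in buckets]
--     ordered_cats += [c for c in buckets if c not in ordered_cats]
--
--     # capped prefix of every bucket, in category order
--     prefixes = [buckets[c][:max(max_per_category, 0)] for c in ordered_cats]
--
--     # transpose: round r collects the r-th element of every prefix long enough
--     rounds = []
--     r = 0
--     while any(r < len(p) for p in prefixes):
--         rounds.append([p[r] for p in prefixes if r < len(p)])
--         r += 1
--
--     flat = [item for rnd in rounds for item in rnd]
--     return flat[:max(max_total, 0)]
-- ===== Notes on version B (the rewrite author's own statement) =====
-- stated objective: simpler
-- what changed: Replaces the stateful while-loop round-robin (per-category counters, added_any flag, mid-loop breaks) by a declarative pipeline: slice each bucket to its capped prefix, transpose the prefixes into rounds, flatten, and slice the result to max_total.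
import Mathlib
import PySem

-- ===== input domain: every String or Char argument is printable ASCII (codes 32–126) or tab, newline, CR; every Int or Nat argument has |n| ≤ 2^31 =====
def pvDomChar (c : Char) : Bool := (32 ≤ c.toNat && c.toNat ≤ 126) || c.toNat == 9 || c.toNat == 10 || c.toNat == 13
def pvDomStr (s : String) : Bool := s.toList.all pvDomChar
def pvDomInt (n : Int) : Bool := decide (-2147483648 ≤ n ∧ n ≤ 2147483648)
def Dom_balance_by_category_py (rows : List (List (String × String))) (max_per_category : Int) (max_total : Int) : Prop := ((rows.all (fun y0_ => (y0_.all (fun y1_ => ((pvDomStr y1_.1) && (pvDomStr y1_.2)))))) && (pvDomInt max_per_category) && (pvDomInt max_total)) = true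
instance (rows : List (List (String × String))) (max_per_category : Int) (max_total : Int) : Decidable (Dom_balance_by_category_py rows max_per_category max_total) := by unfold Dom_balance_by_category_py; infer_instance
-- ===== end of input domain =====

-- B replaces A's stateful round-robin while-loop (per-category counters, added_any flag,
-- mid-loop breaks) by a declarative pipeline: capped bucket prefixes, transpose into
-- rounds, flatten, slice to max_total.  Objective: simpler.  Proved equal on all inputs.


-- ===== PORT A =====
-- helpers shared by both ports: both Pythons contain this identical bucket/ordering code.
-- cat = row.get("category", "") or "other"
def pvCatOf (row : List (String × String)) : String :=
  let c := PySem.Dict.getD (PySem.Dict.mk row) "category" ""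
  if c = "" then "other" else c

-- buckets: defaultdict(list); buckets[cat].append(row)
def pvBuckets (rows : List (List (String × String))) :
    PySem.Dict String (List (List (String × String))) :=
  rows.foldl (fun d row => d.modify (pvCatOf row) [] (· ++ [row])) PySem.Dict.empty

def pvPriority : List String :=
  ["dress", "top", "bottom", "skirt", "jumpsuit", "knitwear", "outerwear", "other"]

-- ordered_cats = [c for c in priority_order if c in buckets] + [c for c in buckets if c not in ordered_cats]
def pvOrderedCats (buckets : PySem.Dict String (List (List (String × String)))) : List String :=
  let first := pvPriority.filter (fun c => buckets.contains c)
  first ++ (buckets.keys.filter (fun c => !(first.contains c)))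

-- inner 'for cat in ordered_cats' body; returns (selected, cat_counts, added_any, broke)
def pvAInner (buckets : PySem.Dict String (List (List (String × String))))
    (cap total : Int) (r : Nat) :
    List String → List (List (String × String)) → PySem.Dict String Int → Bool →
    List (List (String × String)) × PySem.Dict String Int × Bool × Bool
  | [], sel, cnts, added => (sel, cnts, added, false)
  | cat :: rest, sel, cnts, added =>
    if cnts.getD cat 0 ≥ cap then
      pvAInner buckets cap total r rest sel cnts added
    else if (r : Int) < ((buckets.getD cat []).length : Int) then
      -- buckets[cat][round_idx]: r is a Nat counted up from 0 and the guard makes it in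
      -- range, so List.getD is exact here
      let sel' := sel ++ [(buckets.getD cat []).getD r []]
      let cnts' := cnts.modify cat 0 (· + 1)
      if (sel'.length : Int) ≥ total then (sel', cnts', true, true)
      else pvAInner buckets cap total r rest sel' cnts' true
    else
      pvAInner buckets cap total r rest sel cnts added

-- outer 'while len(selected) < max_total' loop; fuel bounds the number of iterations
-- (a round with added_any adds an element of some bucket at index round_idx, so at most
-- rows.length + 1 iterations run; the fuel guard only makes the recursion total)
def pvAOuter (buckets : PySem.Dict String (List (List (String × String))))
    (ordered : List String) (cap total : Int) :
    Nat → Nat → List (List (String × String)) → PySem.Dict String Int →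
    List (List (String × String))
  | 0, _, sel, _ => sel
  | fuel + 1, r, sel, cnts =>
    if (sel.length : Int) < total then
      match pvAInner buckets cap total r ordered sel cnts false with
      | (sel', cnts', added, broke) =>
        if broke then sel'
        else if added then pvAOuter buckets ordered cap total fuel (r + 1) sel' cnts'
        else sel'
    else sel

def balance_by_category_py (rows : List (List (String × String))) (max_per_category : Int) (max_total : Int) : List (List (String × String)) :=
  let buckets := pvBuckets rows
  let ordered := pvOrderedCats buckets
  pvAOuter buckets ordered max_per_category max_total (rows.length + 1) 0 [] PySem.Dict.empty

-- ===== PORT B =====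
-- prefixes = [buckets[c][:max(max_per_category, 0)] for c in ordered_cats]
def pvPrefixes (buckets : PySem.Dict String (List (List (String × String))))
    (ordered : List String) (cap : Int) : List (List (List (String × String))) :=
  ordered.map (fun c => PySem.List.slice (buckets.getD c []) none (some (max cap 0)))

-- while any(r < len(p) for p in prefixes): rounds.append([p[r] for p in prefixes if r < len(p)])
def pvTranspose (prefixes : List (List (List (String × String)))) (r : Nat) :
    List (List (List (String × String))) :=
  if h : prefixes.any (fun p => r < p.length) then
    prefixes.filterMap (fun p => p[r]?) :: pvTranspose prefixes (r + 1)
  else []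
termination_by (prefixes.foldl (fun acc p => max acc p.length) 0) - r
decreasing_by
  simp only [List.any_eq_true, decide_eq_true_eq] at h
  obtain ⟨p, hp, hr⟩ := h
  have := (PySem.List.le_foldl_max_nat prefixes List.length 0).2 p hp
  omega

def balance_by_category_py_alt (rows : List (List (String × String))) (max_per_category : Int) (max_total : Int) : List (List (String × String)) :=
  let buckets := pvBuckets rows
  let ordered := pvOrderedCats buckets
  let flat := (pvTranspose (pvPrefixes buckets ordered max_per_category) 0).flatten
  PySem.List.slice flat none (some (max max_total 0))

-- ===== PRECONDITION & SPEC =====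
def Spec_balance_by_category_py (rows : List (List (String × String))) (max_per_category : Int) (max_total : Int) (out : List (List (String × String))) : Prop := out = balance_by_category_py_alt rows max_per_category max_total
instance (rows : List (List (String × String))) (max_per_category : Int) (max_total : Int) (out : List (List (String × String))) : Decidable (Spec_balance_by_category_py rows max_per_category max_total out) := by unfold Spec_balance_by_category_py; infer_instance

-- ===== CLAIM (what is proved, stated in full; the proofs are below) =====
def Claim_equal_balance_by_category_py : Prop := ∀ (rows : List (List (String × String))) (max_per_category : Int) (max_total : Int), Dom_balance_by_category_py rows max_per_category max_total → Spec_balance_by_category_py rows max_per_category max_total (balance_by_category_py rows max_per_category max_total)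

-- ===== LEMMAS AND PROOFS =====

-- the items the inner for-loop would append at round r (no truncation)
def pvRow (buckets : PySem.Dict String (List (List (String × String)))) (cap : Int)
    (r : Nat) (cats : List String) : List (List (String × String)) :=
  cats.filterMap (fun c => ((buckets.getD c []).take (max cap 0).toNat)[r]?)


lemma pvInner_spec (buckets : PySem.Dict String (List (List (String × String))))
    (cap total : Int) (r : Nat) :
    ∀ (cats : List String) (sel : List (List (String × String)))
      (cnts : PySem.Dict String Int) (added : Bool),
    cats.Nodup →
    ((sel.length : Int) < total) →
    (∀ c ∈ cats, cnts.getD c 0 =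
        min (r : Int) (min ((buckets.getD c []).length : Int) (max cap 0))) →
    (pvAInner buckets cap total r cats sel cnts added).1 =
        sel ++ (pvRow buckets cap r cats).take (total - sel.length).toNat ∧
    (pvAInner buckets cap total r cats sel cnts added).2.2.1 =
        (added || !(pvRow buckets cap r cats).isEmpty) ∧
    (pvAInner buckets cap total r cats sel cnts added).2.2.2 =
        decide (total ≤ sel.length + (pvRow buckets cap r cats).length) ∧
    ((pvAInner buckets cap total r cats sel cnts added).2.2.2 = false →
      ∀ c, (pvAInner buckets cap total r cats sel cnts added).2.1.getD c 0 =
        if c ∈ cats then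
          min ((r : Int) + 1) (min ((buckets.getD c []).length : Int) (max cap 0))
        else cnts.getD c 0) := by
  intro cats
  induction cats with
  | nil =>
    intro sel cnts added _ hsel _
    simp [pvAInner, pvRow]
    omega
  | cons cat rest ih =>
    intro sel cnts added hnd hsel hinv
    have hndr : rest.Nodup := hnd.of_cons
    have hcat : cat ∉ rest := (List.nodup_cons.mp hnd).1
    have hcnt : cnts.getD cat 0 =
        min (r : Int) (min ((buckets.getD cat []).length : Int) (max cap 0)) :=
      hinv cat (by simp)
    set L := (buckets.getD cat []).length with hL
    have hMcast : ((max cap 0).toNat : Int) = max cap 0 :=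
      Int.toNat_of_nonneg (le_max_right _ _)
    have hidx : ((buckets.getD cat []).take (max cap 0).toNat)[r]? =
        if (r : Int) < min (L : Int) (max cap 0)
        then some ((buckets.getD cat []).getD r []) else none := by
      rw [List.getElem?_take]
      by_cases h : (r : Int) < min (L : Int) (max cap 0)
      · rw [if_pos h, if_pos (by omega), List.getElem?_eq_getElem (by omega),
          List.getD_eq_getElem?_getD, List.getElem?_eq_getElem (by omega)]
        rfl
      · rw [if_neg h]
        by_cases h2 : r < (max cap 0).toNat
        · rw [if_pos h2, List.getElem?_eq_none_iff.mpr (by omega)]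
        · rw [if_neg h2]
    have hrow : pvRow buckets cap r (cat :: rest) =
        (if (r : Int) < min (L : Int) (max cap 0)
         then [(buckets.getD cat []).getD r []] else [])
          ++ pvRow buckets cap r rest := by
      simp only [pvRow, List.filterMap_cons]
      rw [hidx]; split_ifs <;> simp
    simp only [pvAInner]
    split_ifs with h1 h2 h3
    · -- skipped: counter at cap
      have hnone : ¬ ((r : Int) < min (L : Int) (max cap 0)) := by omega
      rw [hrow]; simp only [hnone, if_false, List.nil_append]
      have := ih sel cnts added hndr hsel (fun c hc => hinv c (by simp [hc]))
      refine ⟨this.1, this.2.1, this.2.2.1, fun hb c => ?_⟩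
      rw [this.2.2.2 hb c]
      by_cases hc : c ∈ rest
      · simp [hc]
      · simp only [hc, if_false, List.mem_cons, or_false]
        by_cases hcc : c = cat
        · subst hcc; omega
        · simp [hcc]
    · -- taken, then break
      have htake : (r : Int) < min (L : Int) (max cap 0) := by omega
      rw [hrow]; simp only [htake, if_true, List.singleton_append]
      have hq : (total - (sel.length : Int)).toNat = 1 := by
        simp only [List.length_append, List.length_cons, List.length_nil] at h3
        omega
      refine ⟨?_, by simp, ?_, fun hb => by simp at hb⟩
      · rw [hq]; rfl
      · symm
        rw [decide_eq_true_iff]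
        simp only [List.length_append, List.length_cons, List.length_nil] at h3
        simp only [List.length_cons]
        push_cast at h3 ⊢
        omega
    · -- taken, continue
      have htake : (r : Int) < min (L : Int) (max cap 0) := by omega
      rw [hrow]; simp only [htake, if_true, List.singleton_append]
      have hsel' : (((sel ++ [(buckets.getD cat []).getD r []]).length : Int)) < total := by
        simp only [List.length_append, List.length_cons, List.length_nil] at h3 ⊢
        push_cast at h3 ⊢
        omega
      have hinv' : ∀ c ∈ rest, (cnts.modify cat 0 (· + 1)).getD c 0 =
          min (r : Int) (min ((buckets.getD c []).length : Int) (max cap 0)) := by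
        intro c hc
        rw [PySem.Dict.getD_modify]
        have hne : ¬ c = cat := fun h => hcat (h ▸ hc)
        simp only [hne, if_false]
        exact hinv c (by simp [hc])
      have hrec := ih (sel ++ [(buckets.getD cat []).getD r []]) (cnts.modify cat 0 (· + 1))
        true hndr hsel' hinv'
      refine ⟨?_, ?_, ?_, fun hb c => ?_⟩
      · rw [hrec.1]
        obtain ⟨k, hk⟩ : ∃ k, (total - (sel.length : Int)).toNat = k + 1 :=
          ⟨(total - (sel.length : Int)).toNat - 1, by omega⟩
        have hq' : (total - (((sel ++ [(buckets.getD cat []).getD r []]).length : Nat) : Int)).toNat = k := by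
          simp only [List.length_append, List.length_cons, List.length_nil]
          push_cast
          omega
        rw [hq', hk, List.take_succ_cons, List.append_assoc, List.singleton_append]
      · rw [hrec.2.1]; simp
      · rw [hrec.2.2.1]
        simp only [List.length_append, List.length_cons, List.length_nil]
        congr 1
        simp only [eq_iff_iff]
        push_cast
        constructor <;> omega
      · rw [hrec.2.2.2 hb c]
        by_cases hc : c ∈ rest
        · simp [hc]
        · simp only [hc, if_false, List.mem_cons, or_false]
          by_cases hcc : c = cat
          · subst hcc
            rw [PySem.Dict.getD_modify_self, hcnt]
            simp only [← hL, if_true]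
            omega
          · simp [PySem.Dict.getD_modify, hcc]
    · -- bucket exhausted at round r
      have hnone : ¬ ((r : Int) < min (L : Int) (max cap 0)) := by omega
      rw [hrow]; simp only [hnone, if_false, List.nil_append]
      have := ih sel cnts added hndr hsel (fun c hc => hinv c (by simp [hc]))
      refine ⟨this.1, this.2.1, this.2.2.1, fun hb c => ?_⟩
      rw [this.2.2.2 hb c]
      by_cases hc : c ∈ rest
      · simp [hc]
      · simp only [hc, if_false, List.mem_cons, or_false]
        by_cases hcc : c = cat
        · subst hcc; omega
        · simp [hcc]

lemma pvTranspose_unfold (prefixes : List (List (List (String × String)))) (r : Nat) :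
    pvTranspose prefixes r =
      if prefixes.any (fun p => r < p.length)
      then prefixes.filterMap (fun p => p[r]?) :: pvTranspose prefixes (r + 1)
      else [] := by
  rw [pvTranspose]
  split <;> simp_all

lemma pvPrefixes_eq_map (buckets : PySem.Dict String (List (List (String × String))))
    (ordered : List String) (cap : Int) :
    pvPrefixes buckets ordered cap =
      ordered.map (fun c => (buckets.getD c []).take (max cap 0).toNat) := by
  simp only [pvPrefixes]
  refine List.map_congr_left (fun c _ => ?_)
  exact PySem.List.slice_to _ (le_max_right _ _)

lemma pvPrefixes_row (buckets : PySem.Dict String (List (List (String × String))))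
    (ordered : List String) (cap : Int) (r : Nat) :
    (pvPrefixes buckets ordered cap).filterMap (fun p => p[r]?) =
      pvRow buckets cap r ordered := by
  rw [pvPrefixes_eq_map, List.filterMap_map]
  rfl

lemma pvRow_empty_iff (buckets : PySem.Dict String (List (List (String × String))))
    (ordered : List String) (cap : Int) (r : Nat) :
    ((pvPrefixes buckets ordered cap).any (fun p => r < p.length) = false) ↔
      pvRow buckets cap r ordered = [] := by
  rw [← pvPrefixes_row, List.filterMap_eq_nil_iff]
  simp only [List.any_eq_false, decide_eq_true_eq]
  constructor
  · intro h p hp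
    exact List.getElem?_eq_none_iff.mpr (by have := h p hp; omega)
  · intro h p hp
    have := h p hp
    rw [List.getElem?_eq_none_iff] at this
    omega

lemma pvAOuter_spec (buckets : PySem.Dict String (List (List (String × String))))
    (ordered : List String) (cap total : Int) (hnod : ordered.Nodup) :
    ∀ (fuel r : Nat) (sel : List (List (String × String))) (cnts : PySem.Dict String Int),
    (∀ p ∈ pvPrefixes buckets ordered cap, p.length ≤ fuel + r) →
    (∀ c ∈ ordered, cnts.getD c 0 =
        min (r : Int) (min ((buckets.getD c []).length : Int) (max cap 0))) →
    pvAOuter buckets ordered cap total fuel r sel cnts =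
      sel ++ ((pvTranspose (pvPrefixes buckets ordered cap) r).flatten.take
        (total - sel.length).toNat) := by
  intro fuel
  induction fuel with
  | zero =>
    intro r sel cnts hbound _
    have hany : (pvPrefixes buckets ordered cap).any (fun p => r < p.length) = false := by
      simp only [List.any_eq_false, decide_eq_true_eq]
      intro p hp
      have := hbound p hp
      omega
    rw [pvTranspose_unfold, hany]
    simp [pvAOuter]
  | succ fuel ih =>
    intro r sel cnts hbound hinv
    by_cases hsel : (sel.length : Int) < total
    · have hin := pvInner_spec buckets cap total r ordered sel cnts false hnod hsel hinv
      rcases hres : pvAInner buckets cap total r ordered sel cnts false with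
        ⟨sel', cnts', added, broke⟩
      rw [hres] at hin
      simp only at hin
      simp only [pvAOuter, if_pos hsel, hres]
      by_cases hrow0 : pvRow buckets cap r ordered = []
      · -- nothing added this round: loop ends, transpose is empty
        have hb : broke = false := by
          rw [hin.2.2.1, hrow0]
          simp only [List.length_nil, decide_eq_false_iff_not]
          push_cast
          omega
        have ha : added = false := by rw [hin.2.1, hrow0]; rfl
        rw [hb, ha]
        rw [pvTranspose_unfold,
          (List.any_eq_false.mpr (by
            intro p hp
            simp only [decide_eq_true_eq]
            have := (pvRow_empty_iff buckets ordered cap r).mpr hrow0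
            simp only [List.any_eq_false, decide_eq_true_eq] at this
            have := this p hp
            omega))]
        rw [hin.1, hrow0]
        simp
      · have hne : (pvTranspose (pvPrefixes buckets ordered cap) r) =
            pvRow buckets cap r ordered ::
              pvTranspose (pvPrefixes buckets ordered cap) (r + 1) := by
          rw [pvTranspose_unfold]
          have : ¬ ((pvPrefixes buckets ordered cap).any (fun p => r < p.length) = false) := by
            rw [pvRow_empty_iff]; exact hrow0
          rw [if_pos (by revert this; cases ((pvPrefixes buckets ordered cap).any
            (fun p => r < p.length)) <;> simp), pvPrefixes_row]
        by_cases hbk : broke = true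
        · -- A breaks mid-round: max_total reached inside this row
          have htot : total ≤ (sel.length : Int) + ((pvRow buckets cap r ordered).length : Int) := by
            have := hin.2.2.1
            rw [hbk] at this
            exact of_decide_eq_true this.symm
          rw [hbk, if_pos rfl, hin.1, hne]
          simp only [List.flatten_cons]
          rw [List.take_append]
          have hz : ((total - (sel.length : Int)).toNat -
              (pvRow buckets cap r ordered).length) = 0 := by omega
          rw [hz]
          simp
        · -- A finishes the round and recurses
          have hb : broke = false := by revert hbk; cases broke <;> simp
          have ha : added = true := by
            rw [hin.2.1]
            revert hrow0
            cases pvRow buckets cap r ordered <;> simp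
          have htot : (sel.length : Int) + ((pvRow buckets cap r ordered).length : Int) < total := by
            have := hin.2.2.1
            rw [hb] at this
            have := of_decide_eq_false this.symm
            omega
          have hsel' : sel' = sel ++ pvRow buckets cap r ordered := by
            rw [hin.1, List.take_of_length_le (by omega)]
          have hinv' : ∀ c ∈ ordered, cnts'.getD c 0 =
              min ((r : Int) + 1) (min ((buckets.getD c []).length : Int) (max cap 0)) := by
            intro c hc
            rw [hin.2.2.2 hb c, if_pos hc]
          have hbound' : ∀ p ∈ pvPrefixes buckets ordered cap, p.length ≤ fuel + (r + 1) := by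
            intro p hp
            have := hbound p hp
            omega
          rw [hb, ha]
          simp only [if_false, if_true, Bool.false_eq_true]
          have hq : ((total - (sel.length : Int)).toNat - (pvRow buckets cap r ordered).length)
              = (total - (((sel ++ pvRow buckets cap r ordered).length : Nat) : Int)).toNat := by
            simp only [List.length_append]
            omega
          have hq1 : (pvRow buckets cap r ordered).length ≤ (total - (sel.length : Int)).toNat := by
            omega
          rw [ih (r + 1) sel' cnts' hbound' hinv', hsel', hne]
          simp only [List.flatten_cons]
          rw [List.take_append, List.take_of_length_le hq1, hq, List.append_assoc]
    · rw [pvAOuter, if_neg hsel]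
      have : (total - (sel.length : Int)).toNat = 0 := by omega
      rw [this]
      simp

lemma pvBuckets_getD (rows : List (List (String × String))) (c : String) :
    (pvBuckets rows).getD c [] = rows.filter (fun row => pvCatOf row == c) := by
  have h1 : pvBuckets rows =
      (rows.map (fun row => (pvCatOf row, row))).foldl
        (fun d p => d.modify p.1 [] (· ++ [p.2])) PySem.Dict.empty := by
    rw [List.foldl_map]
    rfl
  rw [h1, PySem.Dict.getD_foldl_modify_append, PySem.Dict.getD_empty,
    List.filter_map, List.map_map]
  simp [Function.comp_def]

lemma pvOrderedCats_nodup (b : PySem.Dict String (List (List (String × String))))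
    (hk : b.keys.Nodup) : (pvOrderedCats b).Nodup := by
  simp only [pvOrderedCats]
  refine List.Nodup.append ((by decide : pvPriority.Nodup).filter _) (hk.filter _) ?_
  intro a ha hb
  have h2 := (List.mem_filter.mp hb).2
  simp only [Bool.not_eq_eq_eq_not, Bool.not_true, List.contains_eq_mem,
    decide_eq_false_iff_not] at h2
  exact h2 ha

lemma pvBuckets_keys_nodup (rows : List (List (String × String))) :
    (pvBuckets rows).keys.Nodup := by
  exact PySem.Dict.nodup_keys_foldl_modify_key rows pvCatOf [] (fun _ row => (· ++ [row]))
    PySem.Dict.empty (by simp [PySem.Dict.keys_empty])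

lemma pv_main_eq : ∀ (rows : List (List (String × String)))
    (cap total : Int),
    balance_by_category_py rows cap total = balance_by_category_py_alt rows cap total := by
  intro rows cap total
  unfold balance_by_category_py balance_by_category_py_alt
  have hnod : (pvOrderedCats (pvBuckets rows)).Nodup :=
    pvOrderedCats_nodup _ (pvBuckets_keys_nodup rows)
  have hbound : ∀ p ∈ pvPrefixes (pvBuckets rows) (pvOrderedCats (pvBuckets rows)) cap,
      p.length ≤ (rows.length + 1) + 0 := by
    intro p hp
    rw [pvPrefixes_eq_map] at hp
    simp only [List.mem_map] at hp
    obtain ⟨c, _, rfl⟩ := hp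
    have h1 : ((pvBuckets rows).getD c []).length ≤ rows.length := by
      rw [pvBuckets_getD]
      exact List.length_filter_le _ _
    rw [List.length_take]
    omega
  have hinv : ∀ c ∈ pvOrderedCats (pvBuckets rows),
      (PySem.Dict.empty : PySem.Dict String Int).getD c 0 =
        min ((0 : Nat) : Int) (min (((pvBuckets rows).getD c []).length : Int) (max cap 0)) := by
    intro c _
    rw [PySem.Dict.getD_empty]
    have h1 : (0 : Int) ≤ (((pvBuckets rows).getD c []).length : Int) := by positivity
    omega
  rw [pvAOuter_spec (pvBuckets rows) (pvOrderedCats (pvBuckets rows)) cap total hnod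
    (rows.length + 1) 0 [] PySem.Dict.empty hbound hinv]
  rw [PySem.List.slice_to _ (le_max_right _ _)]
  simp only [List.length_nil, Nat.cast_zero, sub_zero, List.nil_append]
  congr 1
  omega

-- ===== VERDICT (by name: the statement is the Claim_ definition above) =====
theorem balance_by_category_py_spec : Claim_equal_balance_by_category_py := by
  intro rows max_per_category max_total _
  unfold Spec_balance_by_category_py
  exact pv_main_eq rows max_per_category max_total
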